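-- pv_equiv track=rewrite | github.com/Br1m4zz/ProAnalyzer | python_inference/CalibrateData.py | generate_continue_mask
-- ===== SOURCE A (Python) =====
-- def generate_continue_mask(diff_list):
--     """
--     反映了字段在该算子变异的连续敏感度
--
--     根据 diff_list 构造一个与其长度一致的 mask 序列：
--     - diff_list 值为 0 的位置，mask 值为 0；
--     - diff_list 值不为 0 的位置，交替赋值 1 和 2。
--
--     参数：
--         diff_list: 包含差值的数据列表，例如 [0, 0, 1, 1, 1, 0, 0, -1, -1]
--
--     返回：
--         mask: 一个等长于 diff_list 的列表，仅包含 0, 1, 2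
--             例如：
--             输入  [0, 0, 1, 1, 1, 0, 0, -1, -1]
--             输出  [0, 0, 1, 1, 1, 0, 0, 2, 2]
--     """
--     if not diff_list:
--         return []
--     mask = []
--     nonzero_toggle = 1  # 用于交替赋值 1 和 2
--     current_value = diff_list[0]
--
--     for i, value in enumerate(diff_list):
--         if value == 0:
--             mask.append(0)
--         else:
--             if i == 0 or value != current_value:
--                 nonzero_toggle = 2 if nonzero_toggle == 1 else 1  # 交替使用 1 和 2
--             mask.append(nonzero_toggle)
--         current_value = value  # 更新当前值
--     return mask
-- ===== SOURCE B (Python) =====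
-- def generate_continue_mask(diff_list):
--     # Run-based decomposition: scan each maximal run of equal values, emit a
--     # whole block per run; the toggle flips once per nonzero run.
--     mask = []
--     toggle = 1
--     i = 0
--     n = len(diff_list)
--     while i < n:
--         x = diff_list[i]
--         j = i + 1
--         while j < n and diff_list[j] == x:
--             j += 1
--         if x == 0:
--             mask += [0] * (j - i)
--         else:
--             toggle = 3 - toggle
--             mask += [toggle] * (j - i)
--         i = j
--     return mask
-- ===== Notes on version B (the rewrite author's own statement) =====
-- stated objective: alternative
-- what changed: A walks element-by-element with enumerate, a previous-value register and an i==0 special case; B splits the list into maximal runs of equal values and emits one whole block per run, flipping the toggle once per nonzero run.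
import Mathlib
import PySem

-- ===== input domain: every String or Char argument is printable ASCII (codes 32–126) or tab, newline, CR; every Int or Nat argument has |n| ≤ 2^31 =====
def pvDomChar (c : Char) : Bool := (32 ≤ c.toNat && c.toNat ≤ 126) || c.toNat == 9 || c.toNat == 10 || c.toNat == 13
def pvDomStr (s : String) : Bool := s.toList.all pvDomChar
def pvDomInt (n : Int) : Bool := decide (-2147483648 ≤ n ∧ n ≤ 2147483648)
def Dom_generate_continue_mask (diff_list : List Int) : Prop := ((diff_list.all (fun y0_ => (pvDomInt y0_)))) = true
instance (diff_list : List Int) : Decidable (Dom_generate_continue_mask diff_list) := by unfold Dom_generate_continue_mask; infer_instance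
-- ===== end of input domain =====

-- B replaces A's element-at-a-time enumerate loop by a run-at-a-time decomposition (alternative, same cost).

-- ===== PORT A =====
-- loop body of A's for-loop: state (mask, toggle, current_value), item (i, value)
def aStep (st : List Int × Int × Int) (iv : Int × Int) : List Int × Int × Int :=
  let mask := st.1
  let toggle := st.2.1
  let cur := st.2.2
  let i := iv.1
  let value := iv.2
  if value = 0 then (mask ++ [(0 : Int)], toggle, value)
  else
    let t := if i = 0 ∨ value ≠ cur then (if toggle = 1 then (2 : Int) else 1) else toggle
    (mask ++ [t], t, value)

def generate_continue_mask (diff_list : List Int) : List Int :=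
  if diff_list = [] then []
  else
    ((PySem.List.enumerate diff_list 0).foldl aStep ([], 1, diff_list.headI)).1

-- ===== PORT B =====
-- B's outer while-loop: consume the maximal run at the head, emit its block, recurse on the rest
def gcmGo : List Int → Int → List Int
  | [], _ => []
  | x :: rest, toggle =>
    let k := 1 + (rest.takeWhile (fun y => y == x)).length
    let rest' := rest.dropWhile (fun y => y == x)
    if x = 0 then List.replicate k 0 ++ gcmGo rest' toggle
    else List.replicate k (3 - toggle) ++ gcmGo rest' (3 - toggle)
  termination_by xs _ => xs.length
  decreasing_by
    all_goals
      simp only [List.length_cons]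
      exact Nat.lt_succ_of_le (List.length_dropWhile_le _ _)

def generate_continue_mask_alt (diff_list : List Int) : List Int := gcmGo diff_list 1

-- ===== PRECONDITION & SPEC =====
def Spec_generate_continue_mask (diff_list : List Int) (out : List Int) : Prop := out = generate_continue_mask_alt diff_list
instance (diff_list : List Int) (out : List Int) : Decidable (Spec_generate_continue_mask diff_list out) := by unfold Spec_generate_continue_mask; infer_instance

-- ===== CLAIM (what is proved, stated in full; the proofs are below) =====
def Claim_equal_generate_continue_mask : Prop := ∀ (diff_list : List Int), Dom_generate_continue_mask diff_list → Spec_generate_continue_mask diff_list (generate_continue_mask diff_list)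

-- ===== LEMMAS AND PROOFS =====

-- recursive characterisation of A's loop after the first element (i ≥ 1)
def aGo : List Int → Int → Int → List Int
  | [], _, _ => []
  | v :: rest, toggle, cur =>
    if v = 0 then 0 :: aGo rest toggle v
    else
      let t := if v ≠ cur then (if toggle = 1 then (2 : Int) else 1) else toggle
      t :: aGo rest t v

lemma foldA (xs : List Int) : ∀ (s : Int) (mask : List Int) (toggle cur : Int), 1 ≤ s →
    ((PySem.List.enumerate xs s).foldl aStep (mask, toggle, cur)).1 = mask ++ aGo xs toggle cur := by
  induction xs with
  | nil => intro s mask toggle cur _; simp [PySem.List.enumerate_nil, aGo]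
  | cons v rest ih =>
    intro s mask toggle cur hs
    rw [PySem.List.enumerate_cons]
    simp only [List.foldl_cons]
    by_cases hv : v = 0
    · subst hv
      simp only [aStep]
      rw [ih (s+1) _ _ _ (by omega)]
      simp [aGo]
    · have hs0 : s ≠ 0 := by omega
      simp only [aStep, if_neg hv]
      rw [ih (s+1) _ _ _ (by omega)]
      simp only [aGo, if_neg hv, hs0, false_or]
      simp

lemma gcmGo_cons_zero (xs : List Int) (t : Int) : gcmGo (0 :: xs) t = 0 :: gcmGo xs t := by
  cases xs with
  | nil => simp [gcmGo]
  | cons y ys =>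
    by_cases hy : y = 0
    · subst hy
      rw [gcmGo, gcmGo]
      simp only [List.takeWhile_cons, List.dropWhile_cons, beq_self_eq_true, if_true,
        List.length_cons]
      rw [show 1 + ((List.takeWhile (fun y => y == (0:Int)) ys).length + 1)
            = (1 + (List.takeWhile (fun y => y == (0:Int)) ys).length) + 1 from by omega,
        List.replicate_succ]
      simp
    · rw [gcmGo]
      simp [hy]

lemma aGo_spec (xs : List Int) : ∀ (toggle cur : Int), (toggle = 1 ∨ toggle = 2) →
    aGo xs toggle cur =
      if cur = 0 then gcmGo xs toggle
      else List.replicate ((xs.takeWhile (fun y => y == cur)).length) toggle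
           ++ gcmGo (xs.dropWhile (fun y => y == cur)) toggle := by
  induction xs with
  | nil => intro toggle cur _; simp [aGo, gcmGo]
  | cons v rest ih =>
    intro toggle cur htog
    have hflip : (if toggle = 1 then (2:Int) else 1) = 3 - toggle := by
      rcases htog with h | h <;> simp [h]
    by_cases hcur : cur = 0
    · subst hcur
      by_cases hv : v = 0
      · subst hv
        rw [aGo, if_pos rfl, ih toggle 0 htog, if_pos rfl, gcmGo_cons_zero]
        simp
      · rw [aGo, if_neg hv]
        have hvne : v ≠ (0:Int) := hv
        simp only [if_pos hvne, hflip]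
        have h3 : (3 - toggle = 1 ∨ 3 - toggle = 2) := by
          rcases htog with h | h <;> simp [h]
        rw [ih (3 - toggle) v h3, if_neg hv]
        rw [gcmGo, if_neg hv, Nat.add_comm, List.replicate_succ]
        simp
    · simp only [if_neg hcur]
      by_cases hv : v = 0
      · subst hv
        rw [aGo, if_pos rfl, ih toggle 0 htog, if_pos rfl]
        have htw : ((0:Int) :: rest).takeWhile (fun y => y == cur) = [] := by
          simp [Ne.symm hcur]
        have hdw : ((0:Int) :: rest).dropWhile (fun y => y == cur) = 0 :: rest := by
          simp [Ne.symm hcur]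
        rw [htw, hdw, gcmGo_cons_zero]
        simp
      · by_cases hvc : v = cur
        · subst hvc
          rw [aGo, if_neg hv]
          simp only [ne_eq, not_true_eq_false, if_false]
          rw [ih toggle v htog, if_neg hv]
          simp [List.replicate_succ]
        · rw [aGo, if_neg hv]
          simp only [ne_eq, hvc, not_false_eq_true, if_pos, hflip]
          have h3 : (3 - toggle = 1 ∨ 3 - toggle = 2) := by
            rcases htog with h | h <;> simp [h]
          rw [ih (3 - toggle) v h3, if_neg hv]
          have htw : (v :: rest).takeWhile (fun y => y == cur) = [] := by
            simp [hvc]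
          have hdw : (v :: rest).dropWhile (fun y => y == cur) = v :: rest := by
            simp [hvc]
          rw [htw, hdw, gcmGo, if_neg hv, Nat.add_comm, List.replicate_succ]
          simp

-- ===== VERDICT (by name: the statement is the Claim_ definition above) =====
theorem generate_continue_mask_spec : Claim_equal_generate_continue_mask := by
  intro diff_list _
  unfold Spec_generate_continue_mask generate_continue_mask generate_continue_mask_alt
  cases diff_list with
  | nil => simp [gcmGo]
  | cons x xs =>
    simp only [if_neg (by simp : ¬ (x :: xs = []))]
    rw [PySem.List.enumerate_cons]
    simp only [List.foldl_cons, List.headI, zero_add]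
    by_cases hx : x = 0
    · subst hx
      have hstep : aStep ([], 1, (0:Int)) (0, 0) = ([0], 1, 0) := by simp [aStep]
      rw [hstep, foldA xs 1 _ _ _ (by omega)]
      rw [aGo_spec xs 1 0 (Or.inl rfl), if_pos rfl, gcmGo_cons_zero]
      simp
    · have hstep : aStep ([], 1, x) (0, x) = ([2], 2, x) := by simp [aStep, hx]
      rw [hstep, foldA xs 1 _ _ _ (by omega)]
      rw [aGo_spec xs 2 x (Or.inr rfl), if_neg hx]
      rw [gcmGo, if_neg hx, Nat.add_comm, List.replicate_succ]
      norm_num
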